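-- pv_equiv track=rewrite | github.com/tushar-jaiswal/CSProblems | Problems/Beat Notations/BeatNotations.py | convert_single_instrument
-- ===== SOURCE A (Python) =====
-- def beats_to_durations(beats):
--     durations = []
--     i = 0
--     n = len(beats)
--     while i < n:
--         if beats[i] == '1':
--             duration = 1
--             j = i + 1
--             while j < n and beats[j] == '0':
--                 duration += 1
--                 j += 1
--             durations.append((i, duration))
--             i = j
--         else:
--             i += 1
--     return durations  # List of (start_beat_index, duration)
--
-- def convert_single_instrument(line):
--     parts = line.strip().split()
--     name, rhythm = parts[0], parts[1:]
--     durations = beats_to_durations(rhythm)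
--     result = []
--     for _, d in durations:
--         result.append(f"{name}{duration_to_notation(d)}")
--     return " ".join(result)
--
-- def duration_to_notation(duration):
--     # Assuming 1 beat = quarter note = "4"
--     mapping = {
--         1: "4",
--         2: "2",
--         3: "d2",
--         4: "1"
--     }
--     return mapping.get(duration, f"*{duration}")
-- ===== SOURCE B (Python) =====
-- def convert_single_instrument(line):
--     parts = line.strip().split()
--     name = parts[0]
--     # stage 1: compress the rhythm to one character per token ('0'/'1' kept, anything else 'x')
--     s = ''.join(t if t in ('0', '1') else 'x' for t in parts[1:])
--     # stage 2: split at note onsets; each piece after the first starts with the '0's extending that note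
--     pieces = s.split('1')[1:]
--     table = ("4", "2", "d2", "1")
--     out = []
--     for p in pieces:
--         d = 1 + (len(p) - len(p.lstrip('0')))
--         out.append(name + (table[d - 1] if d <= 4 else "*%d" % d))
--     return " ".join(out)
-- ===== Notes on version B (the rewrite author's own statement) =====
-- stated objective: alternative
-- what changed: Replaced A's stateful index scan (nested while loops building index-duration tuples) by staged string processing: compress the tokens into a one-character-per-token string, split it at the note-onset characters, and read each duration as one plus the leading-rest count of the following piece; the dict lookup became a fixed table indexed by duration minus one.
import Mathlib
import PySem

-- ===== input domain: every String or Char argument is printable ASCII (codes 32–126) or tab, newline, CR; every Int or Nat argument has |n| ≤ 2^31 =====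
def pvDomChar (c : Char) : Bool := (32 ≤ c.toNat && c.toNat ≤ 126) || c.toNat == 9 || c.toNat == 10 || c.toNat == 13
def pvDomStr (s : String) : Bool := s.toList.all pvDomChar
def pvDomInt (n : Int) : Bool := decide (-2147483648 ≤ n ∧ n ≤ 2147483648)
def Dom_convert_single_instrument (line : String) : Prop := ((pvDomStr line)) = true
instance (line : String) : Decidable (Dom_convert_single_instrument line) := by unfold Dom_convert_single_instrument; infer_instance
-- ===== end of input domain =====

-- B replaces A's nested index-based while-loop scan by staged string processing:
-- compress tokens to one char each, split on '1', read durations off the pieces (objective: alternative).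

-- ===== PORT A =====
-- inner while loop of beats_to_durations: `while j < n and beats[j] == '0': duration += 1; j += 1`
-- (fuel = beats.length bounds the loop; it only makes the recursion structural, never cuts it short)
def bdInner (beats : List String) : Nat → Int → Nat → Int × Nat
  | 0, duration, j => (duration, j)
  | fuel + 1, duration, j =>
    if h : j < beats.length then
      if beats[j] == "0" then bdInner beats fuel (duration + 1) (j + 1)
      else (duration, j)
    else (duration, j)

-- outer while loop of beats_to_durations (same fuel discipline)
def bdOuter (beats : List String) : Nat → Nat → List (Int × Int)
  | 0, _ => []
  | fuel + 1, i =>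
    if h : i < beats.length then
      if beats[i] == "1" then
        let p := bdInner beats fuel 1 (i + 1)
        ((i : Int), p.1) :: bdOuter beats fuel p.2
      else bdOuter beats fuel (i + 1)
    else []

def beats_to_durations (beats : List String) : List (Int × Int) :=
  bdOuter beats beats.length 0

def duration_to_notation (duration : Int) : String :=
  PySem.Dict.getD (PySem.Dict.ofList [((1 : Int), "4"), (2, "2"), (3, "d2"), (4, "1")]) duration
    (String.ofList ('*' :: PySem.Int.toChars duration))

def convert_single_instrument (line : String) : String :=
  let parts := PySem.Str.split₀ (PySem.Str.strip line)
  match parts with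
  | [] => ""  -- parts[0] raises IndexError in Python; excluded by Pre_
  | name :: rhythm =>
    let durations := beats_to_durations rhythm
    let result := durations.foldl
      (fun acc p => acc ++ [String.ofList (name.toList ++ (duration_to_notation p.2).toList)]) []
    PySem.Str.join " " result

-- ===== PORT B =====
-- exact port of Python str.split('1') (non-empty one-char separator, every occurrence, empties kept)
def split1 : List Char → List (List Char)
  | [] => [[]]
  | c :: rs =>
    let r := split1 rs
    if c = '1' then [] :: r else (c :: r.headD []) :: r.tail

-- `table[d-1] if d <= 4 else "*%d" % d`; in B, d = 1 + leading-zero count ≥ 1, so the index is in range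
def notB (d : Int) : String :=
  if d ≤ 4 then (PySem.List.pyGet? (["4", "2", "d2", "1"] : List String) (d - 1)).getD ""
  else String.ofList ('*' :: PySem.Int.toChars d)

def convert_single_instrument_alt (line : String) : String :=
  match PySem.Str.split₀ (PySem.Str.strip line) with
  | [] => ""  -- parts[0] raises IndexError in Python; excluded by Pre_
  | name :: toks =>
    -- ''.join(t if t in ('0','1') else 'x' for t in parts[1:]), as code points
    let s := toks.flatMap (fun t => if t == "0" || t == "1" then t.toList else ['x'])
    let pieces := (split1 s).tail
    let out := pieces.map (fun p =>
      let d : Int := 1 + ((p.length : Int) - ((p.dropWhile (· = '0')).length : Int))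
      String.ofList (name.toList ++ (notB d).toList))
    PySem.Str.join " " out

-- ===== PRECONDITION & SPEC =====
-- Pre_ excludes exactly the lines that are empty after strip/split: there `parts[0]` raises IndexError in A (and in B).
def Pre_convert_single_instrument (line : String) : Prop :=
  PySem.Str.split₀ (PySem.Str.strip line) ≠ []
instance (line : String) : Decidable (Pre_convert_single_instrument line) := by
  unfold Pre_convert_single_instrument; infer_instance

def pvWitness_convert_single_instrument : String := "drum 1 0 0 1 x 0 1"

def Spec_convert_single_instrument (line : String) (out : String) : Prop := out = convert_single_instrument_alt line
instance (line : String) (out : String) : Decidable (Spec_convert_single_instrument line out) := by unfold Spec_convert_single_instrument; infer_instance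

-- ===== CLAIM (what is proved, stated in full; the proofs are below) =====
def Claim_equal_convert_single_instrument : Prop := ∀ (line : String), Dom_convert_single_instrument line → Pre_convert_single_instrument line → Spec_convert_single_instrument line (convert_single_instrument line)

-- ===== LEMMAS AND PROOFS =====

-- number of leading "0" tokens
def lz (xs : List String) : Nat := (xs.takeWhile (· == "0")).length

-- the note durations of a token list (A-side characterisation)
def runs : List String → List Int
  | [] => []
  | b :: rs =>
    if b == "1" then ((1 : Int) + lz rs) :: runs (rs.drop (lz rs))
    else runs rs
termination_by xs => xs.length
decreasing_by
  · simp
  · simp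

theorem lz_nil : lz [] = 0 := rfl

theorem lz_cons (x : String) (rs : List String) :
    lz (x :: rs) = if x == "0" then lz rs + 1 else 0 := by
  by_cases h : x == "0" <;> simp [lz, List.takeWhile, h]

theorem runs_nil : runs [] = [] := by simp [runs]

theorem runs_cons (b : String) (rs : List String) :
    runs (b :: rs) =
      if b == "1" then ((1 : Int) + lz rs) :: runs (rs.drop (lz rs)) else runs rs := by
  simp [runs]

-- dropping the leading "0" tokens does not change the runs
theorem runs_drop (xs : List String) : runs (xs.drop (lz xs)) = runs xs := by
  induction xs with
  | nil => simp [lz_nil]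
  | cons x rs ih =>
    by_cases h : x == "0"
    · have h1 : (x == "1") = false := by
        cases hh : x == "1" <;> simp_all
      rw [lz_cons]
      simp only [h, if_true, List.drop_succ_cons]
      rw [ih, runs_cons, h1]
      simp
    · rw [lz_cons]
      simp [h]

-- drop-free form of the runs equation
theorem runs_cons' (b : String) (rs : List String) :
    runs (b :: rs) = if b == "1" then ((1 : Int) + lz rs) :: runs rs else runs rs := by
  rw [runs_cons, runs_drop]

-- A's inner loop counts the leading zeros after position j (given enough fuel)
theorem bdInner_eq (beats : List String) :
    ∀ (fuel : Nat) (duration : Int) (j : Nat), beats.length - j ≤ fuel →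
      bdInner beats fuel duration j =
        (duration + (lz (beats.drop j) : Int), j + lz (beats.drop j)) := by
  intro fuel
  induction fuel with
  | zero =>
    intro d j hf
    have hd : beats.drop j = [] := List.drop_eq_nil_of_le (by omega)
    simp [bdInner, hd, lz_nil]
  | succ fuel ih =>
    intro d j hf
    by_cases h : j < beats.length
    · have hd : beats.drop j = beats[j] :: beats.drop (j + 1) := List.drop_eq_getElem_cons h
      by_cases h0 : beats[j] == "0"
      · rw [show bdInner beats (fuel + 1) d j = bdInner beats fuel (d + 1) (j + 1) by
          simp [bdInner, h, h0]]
        rw [ih (d + 1) (j + 1) (by omega), hd, lz_cons]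
        simp only [h0, if_true, Prod.mk.injEq]
        refine ⟨by push_cast; ring, by omega⟩
      · rw [show bdInner beats (fuel + 1) d j = (d, j) by simp [bdInner, h, h0]]
        rw [hd, lz_cons]
        simp [h0]
    · have hd : beats.drop j = [] := List.drop_eq_nil_of_le (by omega)
      simp [bdInner, h, hd, lz_nil]

-- A's outer loop produces exactly the runs of the suffix, as second components
theorem bdOuter_snd (beats : List String) :
    ∀ (fuel : Nat) (i : Nat), beats.length - i ≤ fuel →
      (bdOuter beats fuel i).map (·.2) = runs (beats.drop i) := by
  intro fuel
  induction fuel with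
  | zero =>
    intro i hf
    have hd : beats.drop i = [] := List.drop_eq_nil_of_le (by omega)
    simp [bdOuter, hd, runs_nil]
  | succ fuel ih =>
    intro i hf
    by_cases h : i < beats.length
    · have hd : beats.drop i = beats[i] :: beats.drop (i + 1) := List.drop_eq_getElem_cons h
      by_cases h1 : beats[i] == "1"
      · rw [show bdOuter beats (fuel + 1) i =
            ((i : Int), (bdInner beats fuel 1 (i + 1)).1) ::
              bdOuter beats fuel (bdInner beats fuel 1 (i + 1)).2 by
          simp [bdOuter, h, h1]]
        rw [hd, runs_cons]
        have hp : bdInner beats fuel 1 (i + 1) =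
            ((1 : Int) + (lz (beats.drop (i + 1)) : Int),
              (i + 1) + lz (beats.drop (i + 1))) :=
          bdInner_eq beats fuel 1 (i + 1) (by omega)
        simp only [h1, if_pos]
        rw [List.map_cons, ih _ (by rw [hp]; simp; omega)]
        rw [hp]
        simp [List.drop_drop]
      · rw [show bdOuter beats (fuel + 1) i = bdOuter beats fuel (i + 1) by
          simp [bdOuter, h, h1]]
        rw [hd, runs_cons, ih _ (by omega)]
        simp [h1]
    · have hd : beats.drop i = [] := List.drop_eq_nil_of_le (by omega)
      simp [bdOuter, h, hd, runs_nil]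

-- ----- B-side: char-level runs and the split characterisation -----

-- number of leading '0' characters
def lzc (cs : List Char) : Nat := (cs.takeWhile (· = '0')).length

def runsC : List Char → List Int
  | [] => []
  | c :: rs => if c = '1' then ((1 : Int) + lzc rs) :: runsC rs else runsC rs

theorem lzc_nil : lzc [] = 0 := rfl

theorem lzc_cons (c : Char) (rs : List Char) :
    lzc (c :: rs) = if c = '0' then lzc rs + 1 else 0 := by
  by_cases h : c = '0' <;> simp [lzc, List.takeWhile, h]

theorem split1_ne_nil (cs : List Char) : split1 cs ≠ [] := by
  cases cs with
  | nil => simp [split1]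
  | cons c rs =>
    simp only [split1]
    by_cases h : c = '1' <;> simp [h]

-- the pieces after the first carry exactly the runs; the first piece's leading zeros are the whole string's
theorem split1_spec (cs : List Char) :
    ((split1 cs).tail.map (fun p => (1 : Int) + (lzc p : Int)) = runsC cs) ∧
      lzc ((split1 cs).headD []) = lzc cs := by
  induction cs with
  | nil => simp [split1, runsC, lzc_nil]
  | cons c rs ih =>
    obtain ⟨ih1, ih2⟩ := ih
    by_cases h : c = '1'
    · have hs : split1 (c :: rs) = [] :: split1 rs := by simp [split1, h]
      obtain ⟨p, ps, hr⟩ : ∃ p ps, split1 rs = p :: ps := by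
        cases hrr : split1 rs with
        | nil => exact absurd hrr (split1_ne_nil rs)
        | cons p ps => exact ⟨p, ps, rfl⟩
      constructor
      · rw [hs, List.tail_cons, hr, List.map_cons]
        rw [hr] at ih1 ih2
        simp only [List.tail_cons] at ih1
        simp only [List.headD_cons] at ih2
        rw [ih1, ih2]
        simp [runsC, h]
      · rw [hs]
        simp [h, lzc_cons, lzc_nil]
    · have hs : split1 (c :: rs) = (c :: (split1 rs).headD []) :: (split1 rs).tail := by
        simp [split1, h]
      constructor
      · rw [hs, List.tail_cons, ih1]
        simp [runsC, h]
      · rw [hs]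
        simp only [List.headD_cons]
        rw [lzc_cons, lzc_cons, ih2]
    
-- one-character encoding of a token
def enc1 (t : String) : Char := if t == "1" then '1' else if t == "0" then '0' else 'x'

theorem encSingleton (t : String) :
    (if t == "0" || t == "1" then t.toList else ['x']) = [enc1 t] := by
  by_cases h0 : t == "0"
  · have : t = "0" := by simpa using h0
    subst this; rfl
  · by_cases h1 : t == "1"
    · have : t = "1" := by simpa using h1
      subst this; rfl
    · simp [enc1, h0, h1]

-- the encoded string has the same runs (and leading-zero count) as the token list
theorem encode_spec (xs : List String) :
    runsC (xs.flatMap (fun t => if t == "0" || t == "1" then t.toList else ['x'])) = runs xs ∧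
      lzc (xs.flatMap (fun t => if t == "0" || t == "1" then t.toList else ['x'])) = lz xs := by
  induction xs with
  | nil => simp [runsC, runs_nil, lzc_nil, lz_nil]
  | cons t rs ih =>
    obtain ⟨ih1, ih2⟩ := ih
    rw [List.flatMap_cons, encSingleton, List.singleton_append]
    set E := rs.flatMap (fun t => if t == "0" || t == "1" then t.toList else ['x']) with hE
    constructor
    · rw [runs_cons', show runsC (enc1 t :: E) =
          if enc1 t = '1' then ((1 : Int) + lzc E) :: runsC E else runsC E from rfl]
      by_cases h1 : t == "1"
      · have ht : t = "1" := by simpa using h1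
        subst ht
        simp [enc1, ih1, ih2]
      · have he : enc1 t ≠ '1' := by
          unfold enc1
          by_cases h0 : t == "0" <;> simp [h1, h0]
        simp [h1, he, ih1]
    · rw [lzc_cons, lz_cons]
      by_cases h0 : t == "0"
      · have ht : t = "0" := by simpa using h0
        subst ht
        simp [enc1, ih2]
      · have he : enc1 t ≠ '0' := by
          unfold enc1
          by_cases h1 : t == "1" <;> simp [h1, h0]
        simp [h0, he]

theorem runsC_pos (cs : List Char) : ∀ d ∈ runsC cs, 1 ≤ d := by
  induction cs with
  | nil => simp [runsC]
  | cons c rs ih =>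
    intro d hd
    simp only [runsC] at hd
    by_cases h : c = '1'
    · rw [if_pos h] at hd
      rcases List.mem_cons.mp hd with h' | h'
      · subst h'
        have : (0 : Int) ≤ (lzc rs : Int) := Int.natCast_nonneg _
        omega
      · exact ih d h'
    · rw [if_neg h] at hd
      exact ih d hd

-- B's arithmetic: len(p) - len(p.lstrip('0')) is the leading-zero count
theorem dfun_eq (p : List Char) :
    (1 : Int) + ((p.length : Int) - ((p.dropWhile (· = '0')).length : Int)) =
      1 + (lzc p : Int) := by
  have h := congrArg List.length (List.takeWhile_append_dropWhile (p := (· = '0')) (l := p))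
  rw [List.length_append] at h
  unfold lzc
  omega

-- B's notation table agrees with A's dict (for the durations that occur, d ≥ 1)
theorem notB_eq (d : Int) (hd : 1 ≤ d) : notB d = duration_to_notation d := by
  unfold notB duration_to_notation
  by_cases h1 : d = 1
  · subst h1; decide
  · by_cases h2 : d = 2
    · subst h2; decide
    · by_cases h3 : d = 3
      · subst h3; decide
      · by_cases h4 : d = 4
        · subst h4; decide
        · have hle : ¬ d ≤ 4 := by omega
          have : (PySem.Dict.ofList [((1 : Int), "4"), (2, "2"), (3, "d2"), (4, "1")]).items
              = [((1 : Int), "4"), (2, "2"), (3, "d2"), (4, "1")] := by decide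
          have e1 : ((1 : Int) == d) = false := beq_eq_false_iff_ne.mpr (Ne.symm h1)
          have e2 : ((2 : Int) == d) = false := beq_eq_false_iff_ne.mpr (Ne.symm h2)
          have e3 : ((3 : Int) == d) = false := beq_eq_false_iff_ne.mpr (Ne.symm h3)
          have e4 : ((4 : Int) == d) = false := beq_eq_false_iff_ne.mpr (Ne.symm h4)
          simp [hle, PySem.Dict.getD, PySem.Dict.get?, this, List.find?, e1, e2, e3, e4]

-- ===== VERDICT (by name: the statement is the Claim_ definition above) =====
theorem convert_single_instrument_spec : Claim_equal_convert_single_instrument := by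
  intro line _ hpre
  unfold Spec_convert_single_instrument convert_single_instrument convert_single_instrument_alt
  cases h : PySem.Str.split₀ (PySem.Str.strip line) with
  | nil => exact absurd h hpre
  | cons name toks =>
    simp only
    rw [PySem.List.foldl_append_singleton_eq_map]
    have hA : (beats_to_durations toks).map (·.2) = runs toks := by
      simpa using bdOuter_snd toks toks.length 0 (by omega)
    -- rewrite A's map over pairs as a map over the durations
    have hAmap : (beats_to_durations toks).map
        (fun p => String.ofList (name.toList ++ (duration_to_notation p.2).toList)) =
        (runs toks).map (fun d => String.ofList (name.toList ++ (duration_to_notation d).toList)) := by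
      rw [← hA, List.map_map]
      rfl
    rw [List.nil_append, hAmap]
    -- rewrite B's map over pieces as a map over the durations
    set s := toks.flatMap (fun t => if t == "0" || t == "1" then t.toList else ['x']) with hsdef
    have hBmap : ((split1 s).tail.map (fun p =>
          String.ofList (name.toList ++
            (notB (1 + ((p.length : Int) - ((p.dropWhile (· = '0')).length : Int)))).toList))) =
        (runsC s).map (fun d => String.ofList (name.toList ++ (notB d).toList)) := by
      rw [← (split1_spec s).1, List.map_map]
      apply List.map_congr_left
      intro p _
      simp only [Function.comp_apply]
      rw [dfun_eq]
    rw [hBmap, (encode_spec toks).1]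
    congr 1
    apply List.map_congr_left
    intro d hd
    rw [notB_eq d]
    have := runsC_pos s d
    rw [(encode_spec toks).1] at this
    exact this hd
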